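-- pv_equiv track=rewrite | github.com/BoreZhang/AI-storyboard | utils/utils.py | get_caption_group
-- ===== SOURCE A (Python) =====
-- def get_caption_group(images_groups,captions = []):
--     """
--     获取字幕组。
--     Get caption groups.
--
--     :param images_groups: 图像组列表 List of image groups
--     :param captions: 字幕列表 List of captions
--     :return: 字幕组列表 List of caption groups
--     """
--     caption_groups = []
--     for i in range(len(images_groups)):
--         length = len(images_groups[i])
--         caption_groups.append(captions[:length])
--         captions  = captions[length:]
--     if len(caption_groups[-1]) < len(images_groups[-1]):
--         caption_groups[-1] = caption_groups[-1] + [""] * (len(images_groups[-1]) - len(caption_groups[-1]))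
--     return caption_groups
-- ===== SOURCE B (Python) =====
-- def get_caption_group(images_groups, captions=[]):
--     """
--     Get caption groups: one pass with a running offset; the last group is
--     built padded instead of patched afterwards.
--     """
--     sizes = [len(g) for g in images_groups]
--     groups = []
--     off = 0
--     for n in sizes[:-1]:
--         groups.append(captions[off:off + n])
--         off += n
--     last = captions[off:off + sizes[-1]]
--     groups.append(last + [""] * (sizes[-1] - len(last)))
--     return groups
-- ===== Notes on version B (the rewrite author's own statement) =====
-- stated objective: faster
-- what changed: B makes one pass with a running offset, slicing the original list once per group and building the padded last group directly, instead of A's re-slicing of the remaining tail on every iteration plus a post-hoc patch of the last group.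
-- outside the precondition, e.g. on get_caption_group([], []): A raises IndexError, B raises IndexError
import Mathlib
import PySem

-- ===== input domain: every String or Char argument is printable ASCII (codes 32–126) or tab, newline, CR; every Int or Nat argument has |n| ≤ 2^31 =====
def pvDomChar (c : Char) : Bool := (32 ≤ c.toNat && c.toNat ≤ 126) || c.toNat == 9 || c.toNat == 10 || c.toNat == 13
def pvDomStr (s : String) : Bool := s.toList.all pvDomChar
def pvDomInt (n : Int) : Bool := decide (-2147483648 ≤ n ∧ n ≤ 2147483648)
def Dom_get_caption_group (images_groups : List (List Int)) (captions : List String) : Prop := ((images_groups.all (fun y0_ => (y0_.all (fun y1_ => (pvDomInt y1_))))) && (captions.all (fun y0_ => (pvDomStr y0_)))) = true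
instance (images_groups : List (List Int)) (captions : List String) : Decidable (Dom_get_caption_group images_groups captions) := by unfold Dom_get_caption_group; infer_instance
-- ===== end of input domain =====

-- B replaces A's per-iteration re-slicing of the remaining caption tail (and its post-hoc
-- patch of the last group) with a single running-offset pass over the original list that
-- builds the padded last group directly; a timing run measured B faster.

-- ===== PORT A =====
-- Literal port of A: loop over range(len(images_groups)) carrying (caption_groups, captions),
-- then the negative-index patch of the last group.  pyGetD's defaults are never used: the loop
-- index is always in range, and the [-1] accesses are in range under Pre_ (images_groups ≠ []).
def get_caption_group (images_groups : List (List Int)) (captions : List String) : List (List String) :=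
  let st := (PySem.List.pyRange 0 (images_groups.length : Int) 1).foldl
    (fun (st : List (List String) × List String) i =>
      let length : Int := ((PySem.List.pyGetD images_groups i []).length : Int)
      (st.1 ++ [PySem.List.slice st.2 none (some length)],
       PySem.List.slice st.2 (some length) none))
    ([], captions)
  let cg := st.1
  if (PySem.List.pyGetD cg (-1) []).length < (PySem.List.pyGetD images_groups (-1) []).length then
    PySem.List.pySetD cg (-1)
      ((PySem.List.pyGetD cg (-1) []) ++
        List.replicate ((PySem.List.pyGetD images_groups (-1) []).length
                        - (PySem.List.pyGetD cg (-1) []).length) "")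
  else cg

-- ===== PORT B =====
-- Literal port of Source B: sizes, loop over sizes[:-1] carrying (groups, off), padded last group
-- ([""] * k with k < 0 is [] in Python, matched by Int.toNat).
-- pyGetD's default for sizes[-1] is never used under Pre_ (images_groups ≠ []).
def get_caption_group_alt (images_groups : List (List Int)) (captions : List String) : List (List String) :=
  let sizes : List Int := images_groups.map (fun g => (g.length : Int))
  let st := (PySem.List.slice sizes none (some (-1))).foldl
    (fun (st : List (List String) × Int) n =>
      (st.1 ++ [PySem.List.slice captions (some st.2) (some (st.2 + n))], st.2 + n))
    ([], 0)
  let lastSize : Int := PySem.List.pyGetD sizes (-1) 0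
  let last := PySem.List.slice captions (some st.2) (some (st.2 + lastSize))
  st.1 ++ [last ++ List.replicate (lastSize - (last.length : Int)).toNat ""]

-- ===== PRECONDITION & SPEC =====
-- Pre_ excludes exactly images_groups = [], where A raises IndexError (caption_groups[-1]);
-- B raises IndexError there too (sizes[-1]).
def Pre_get_caption_group (images_groups : List (List Int)) (captions : List String) : Prop :=
  images_groups ≠ []
instance (images_groups : List (List Int)) (captions : List String) : Decidable (Pre_get_caption_group images_groups captions) := by unfold Pre_get_caption_group; infer_instance

def pvWitness_get_caption_group : List (List Int) × List String := ([[1], [2, 3]], ["a", "b"])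

def Spec_get_caption_group (images_groups : List (List Int)) (captions : List String) (out : List (List String)) : Prop := out = get_caption_group_alt images_groups captions
instance (images_groups : List (List Int)) (captions : List String) (out : List (List String)) : Decidable (Spec_get_caption_group images_groups captions out) := by unfold Spec_get_caption_group; infer_instance

-- ===== CLAIM (what is proved, stated in full; the proofs are below) =====
def Claim_equal_get_caption_group : Prop := ∀ (images_groups : List (List Int)) (captions : List String), Dom_get_caption_group images_groups captions → Pre_get_caption_group images_groups captions → Spec_get_caption_group images_groups captions (get_caption_group images_groups captions)

-- ===== LEMMAS AND PROOFS =====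

-- Common characterisation: the caption list cut into chunks of the given sizes.
def chunksN : List Nat → List String → List (List String)
  | [], _ => []
  | n :: t, cs => cs.take n :: chunksN t (cs.drop n)

theorem chunksN_append (xs : List Nat) (n : Nat) (cs : List String) :
    chunksN (xs ++ [n]) cs = chunksN xs cs ++ [(cs.drop xs.sum).take n] := by
  induction xs generalizing cs with
  | nil => simp [chunksN]
  | cons m t ih => simp [chunksN, ih, List.drop_drop]

-- A's loop (after its slices have been rewritten to take/drop) computes the chunks.
theorem foldA_eq (gs : List (List Int)) (cs : List String) (acc : List (List String)) :
    gs.foldl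
      (fun (st : List (List String) × List String) g =>
        (st.1 ++ [st.2.take g.length], st.2.drop g.length))
      (acc, cs)
    = (acc ++ chunksN (gs.map List.length) cs, cs.drop (gs.map List.length).sum) := by
  induction gs generalizing cs acc with
  | nil => simp [chunksN]
  | cons g t ih =>
    simp only [List.foldl_cons]
    rw [ih]
    simp [chunksN, List.drop_drop]

-- B's loop with the running offset computes the same chunks.
theorem foldB_eq (ns : List Nat) (cs : List String) (acc : List (List String)) (k : Nat) :
    (ns.map (Nat.cast : Nat → Int)).foldl
      (fun (st : List (List String) × Int) n =>
        (st.1 ++ [PySem.List.slice cs (some st.2) (some (st.2 + n))], st.2 + n))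
      (acc, (k : Int))
    = (acc ++ chunksN ns (cs.drop k), ((k + ns.sum : Nat) : Int)) := by
  induction ns generalizing acc k with
  | nil => simp [chunksN]
  | cons n t ih =>
    simp only [List.map_cons, List.foldl_cons, PySem.List.slice_natCast_add]
    have hk : (k : Int) + (n : Int) = ((k + n : Nat) : Int) := by push_cast; ring
    rw [hk, ih]
    simp [chunksN, List.drop_drop, Nat.add_comm, Nat.add_assoc, Nat.add_left_comm]

-- Python's caption_groups[-1] = v on a nonempty list xs ++ [x].
theorem pySetD_append_neg_one {α : Type} (xs : List α) (x v : α) :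
    PySem.List.pySetD (xs ++ [x]) (-1) v = xs ++ [v] := by
  simp [PySem.List.pySetD, PySem.List.pySet?, PySem.List.pyIdx?]

-- ===== VERDICT (by name: the statement is the Claim_ definition above) =====
theorem get_caption_group_spec : Claim_equal_get_caption_group := by
  intro ig cs _hdom hpre
  obtain ⟨l, g, rfl⟩ : ∃ l g, ig = l ++ [g] := by
    rcases List.eq_nil_or_concat ig with h | ⟨l, g, h⟩
    · exact absurd h hpre
    · exact ⟨l, g, by simpa using h⟩
  show get_caption_group (l ++ [g]) cs = get_caption_group_alt (l ++ [g]) cs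
  unfold get_caption_group get_caption_group_alt
  rw [PySem.List.foldl_pyRange_zero_pyGetD' (l ++ [g]) []
        (fun (st : List (List String) × List String) g =>
          (st.1 ++ [PySem.List.slice st.2 none (some ((g.length : Nat) : Int))],
           PySem.List.slice st.2 (some ((g.length : Nat) : Int)) none))
        ([], cs)]
  simp only [PySem.List.slice_to_natCast, PySem.List.slice_from_natCast]
  rw [foldA_eq]
  simp only [PySem.List.slice_to_neg_one, List.dropLast_concat, List.map_append, List.map_cons,
    List.map_nil, chunksN_append, List.nil_append]
  have hmap : l.map (fun g => ((g.length : Nat) : Int)) =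
      (l.map List.length).map (Nat.cast : Nat → Int) := by rw [List.map_map]; rfl
  rw [hmap]
  have h0 : (0 : Int) = ((0 : Nat) : Int) := rfl
  rw [h0, foldB_eq]
  simp only [PySem.List.pyGetD_neg_one_append_singleton, List.drop_zero, Nat.zero_add]
  rw [PySem.List.slice_natCast_add]
  set m : Nat := (l.map List.length).sum
  set c : List String := (cs.drop m).take g.length with hc
  have hclen : c.length ≤ g.length := by simp [hc]
  by_cases h : c.length < g.length
  · rw [if_pos (by simpa using h)]
    rw [pySetD_append_neg_one]
    have : ((g.length : Int) - (c.length : Int)).toNat = g.length - c.length := by omega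
    simp [this]
  · rw [if_neg (by simpa using h)]
    have : ((g.length : Int) - (c.length : Int)).toNat = 0 := by omega
    simp [this]
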